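-- pv_equiv track=rewrite | github.com/maddalaprathyusha/First_day | Holiday_coding5.py | distributeCandy
-- ===== SOURCE A (Python) =====
-- def distributeCandy(A):
--     n = len(A)
--     candies = [1] * n
--
--     # Traverse from left to right
--     for i in range(1, n):
--         if A[i] > A[i - 1]:
--             candies[i] = candies[i - 1] + 1
--
--     # Traverse from right to left and update candies array
--     for i in range(n - 2, -1, -1):
--         if A[i] > A[i + 1]:
--             candies[i] = max(candies[i], candies[i + 1] + 1)
--
--     # Return the total minimum candies needed
--     return sum(candies)
-- ===== SOURCE B (Python) =====
-- def distributeCandy(A):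
--     if not A:
--         return 0
--     total = 1
--     up = down = peak = 0
--     for i in range(1, len(A)):
--         prev, cur = A[i - 1], A[i]
--         if cur > prev:
--             up += 1
--             down = 0
--             peak = up
--             total += 1 + up
--         elif cur == prev:
--             up = down = peak = 0
--             total += 1
--         else:
--             down += 1
--             up = 0
--             total += 1 + down
--             if peak >= down:
--                 total -= 1
--     return total
-- ===== Notes on version B (the rewrite author's own statement) =====
-- stated objective: alternative
-- what changed: Replaced the two index passes over a mutable candies array (left-to-right increments, right-to-left max-updates) by the canonical one-pass slope-counting fold that keeps only up/down run lengths and the last peak height in O(1) extra space.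
import Mathlib
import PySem

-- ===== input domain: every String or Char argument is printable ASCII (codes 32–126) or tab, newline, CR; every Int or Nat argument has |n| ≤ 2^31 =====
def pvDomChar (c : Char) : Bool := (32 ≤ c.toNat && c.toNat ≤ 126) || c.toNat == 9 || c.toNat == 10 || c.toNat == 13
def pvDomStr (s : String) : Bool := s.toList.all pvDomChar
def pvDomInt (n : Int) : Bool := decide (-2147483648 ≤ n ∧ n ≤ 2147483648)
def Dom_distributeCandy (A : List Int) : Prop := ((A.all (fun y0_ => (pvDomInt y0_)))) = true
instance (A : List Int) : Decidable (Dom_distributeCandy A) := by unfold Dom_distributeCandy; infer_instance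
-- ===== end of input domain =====

-- B replaces A's two index passes over a candies array by a one-pass slope-counting
-- fold (up/down/peak counters); objective: alternative algorithm, O(1) extra space.

-- ===== PORT A =====
-- indices produced by the ranges are always in bounds, so pyGetD/pySetD defaults are never taken
def distributeCandy (A : List Int) : Int :=
  let n : Int := A.length
  let c0 : List Int := List.replicate A.length 1
  let c1 := (PySem.List.pyRange 1 n 1).foldl (fun c i =>
      if PySem.List.pyGetD A i 0 > PySem.List.pyGetD A (i-1) 0 then
        PySem.List.pySetD c i (PySem.List.pyGetD c (i-1) 0 + 1)
      else c) c0
  let c2 := (PySem.List.pyRange (n-2) (-1) (-1)).foldl (fun c i =>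
      if PySem.List.pyGetD A i 0 > PySem.List.pyGetD A (i+1) 0 then
        PySem.List.pySetD c i (max (PySem.List.pyGetD c i 0) (PySem.List.pyGetD c (i+1) 0 + 1))
      else c) c1
  c2.sum

-- ===== PORT B =====
-- the loop over consecutive pairs of Source B, as structural recursion carrying prev
def altGo (prev up down peak total : Int) : List Int → Int
  | [] => total
  | cur :: rest =>
    if cur > prev then
      altGo cur (up + 1) 0 (up + 1) (total + (1 + (up + 1))) rest
    else if cur = prev then
      altGo cur 0 0 0 (total + 1) rest
    else
      altGo cur 0 (down + 1) peak
        (if peak ≥ down + 1 then (total + (1 + (down + 1))) - 1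
         else total + (1 + (down + 1))) rest

def distributeCandy_alt (A : List Int) : Int :=
  match A with
  | [] => 0
  | a :: rest => altGo a 0 0 0 1 rest

-- ===== PRECONDITION & SPEC =====
def Spec_distributeCandy (A : List Int) (out : Int) : Prop := out = distributeCandy_alt A
instance (A : List Int) (out : Int) : Decidable (Spec_distributeCandy A out) := by unfold Spec_distributeCandy; infer_instance

-- ===== CLAIM (what is proved, stated in full; the proofs are below) =====
def Claim_equal_distributeCandy : Prop := ∀ (A : List Int), Dom_distributeCandy A → Spec_distributeCandy A (distributeCandy A)

-- ===== LEMMAS AND PROOFS =====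

-- left scan: candy count from the increasing-run lengths ending at each position
def incsGo (prev v : Int) : List Int → List Int
  | [] => []
  | x :: r => (if prev < x then v + 1 else 1) :: incsGo x (if prev < x then v + 1 else 1) r

def incs : List Int → List Int
  | [] => []
  | a :: r => 1 :: incsGo a 1 r

-- right scan: decreasing-run lengths starting at each position
def decs : List Int → List Int
  | [] => []
  | [_] => [1]
  | a :: b :: r => (if b < a then ((decs (b :: r)).headD 0) + 1 else 1) :: decs (b :: r)

-- the reference value: sum of pointwise max
def refC (A : List Int) : Int := (List.zipWith max (incs A) (decs A)).sum
-- same, with the roles swapped (used on reversed prefixes)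
def mrev (q : List Int) : Int := (List.zipWith max (decs q) (incs q)).sum

-- run lengths seen from the head of a reversed prefix
def runA (prev : Int) : List Int → Int
  | [] => 0
  | x :: r => if prev < x then 1 + runA x r else 0

def runD (prev : Int) : List Int → Int
  | [] => 0
  | x :: r => if x < prev then 1 + runD x r else 0

def aPeak (prev : Int) : List Int → Int
  | [] => 0
  | x :: r => if prev < x then (if runA x r = 0 then (decs (x :: r)).headD 0 else aPeak x r) else 0

def upF : List Int → Int
  | [] => 0
  | a :: t => runD a t

def downF : List Int → Int
  | [] => 0
  | a :: t => runA a t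

def peakF : List Int → Int
  | [] => 0
  | a :: t => if runA a t = 0 then runD a t else aPeak a t - 1

lemma runA_nonneg (prev : Int) (l : List Int) : 0 ≤ runA prev l := by
  induction l generalizing prev with
  | nil => simp [runA]
  | cons x r ih =>
    simp only [runA]
    split
    · have := ih x; omega
    · omega
lemma runD_nonneg (prev : Int) (l : List Int) : 0 ≤ runD prev l := by
  induction l generalizing prev with
  | nil => simp [runD]
  | cons x r ih =>
    simp only [runD]
    split
    · have := ih x; omega
    · omega
lemma decs_headD (q0 : Int) (t : List Int) : (decs (q0 :: t)).headD 0 = runD q0 t + 1 := by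
  induction t generalizing q0 with
  | nil => simp [decs, runD]
  | cons y t' ih => simp only [decs, runD, List.headD_cons]; rw [ih y]; split <;> omega
lemma incsGo_length (prev v : Int) (l : List Int) : (incsGo prev v l).length = l.length := by
  induction l generalizing prev v with
  | nil => simp [incsGo]
  | cons x r ih => simp [incsGo, ih]
lemma incs_length (A : List Int) : (incs A).length = A.length := by
  cases A <;> simp [incs, incsGo_length]
lemma decs_length (A : List Int) : (decs A).length = A.length := by
  induction A using decs.induct with
  | case1 => simp [decs]
  | case2 a => simp [decs]
  | case3 a b r ih => simp [decs]; simpa [decs] using ih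
lemma incsGo_pos (l : List Int) : ∀ (prev v : Int), 1 ≤ v → ∀ (i : Nat) (h : i < (incsGo prev v l).length), 1 ≤ (incsGo prev v l)[i] := by
  induction l with
  | nil => intro prev v hv i h; simp [incsGo] at h
  | cons x r ih =>
    intro prev v hv i h
    match i with
    | 0 =>
      simp only [incsGo, List.getElem_cons_zero]
      split <;> omega
    | j+1 =>
      simp only [incsGo, List.getElem_cons_succ]
      exact ih x _ (by split <;> omega) j (by simp only [incsGo, List.length_cons] at h; omega)
lemma incs_pos (A : List Int) (i : Nat) (h : i < (incs A).length) : 1 ≤ (incs A)[i] := by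
  match A, i with
  | a :: r, 0 => simp [incs]
  | a :: r, j+1 =>
    simp only [incs, List.getElem_cons_succ]
    exact incsGo_pos r a 1 le_rfl j (by simp only [incs, List.length_cons] at h; omega)
lemma decs_headD_getElem (b : Int) (r : List Int) (h : 0 < (decs (b :: r)).length) :
    (decs (b :: r))[0] = (decs (b :: r)).headD 0 := by
  cases r <;> simp [decs]

lemma decs_pos (A : List Int) : ∀ (i : Nat) (h : i < (decs A).length), 1 ≤ (decs A)[i] := by
  induction A using decs.induct with
  | case1 => intro i h; simp [decs] at h
  | case2 a => intro i h; simp [decs] at h; simp [decs, h]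
  | case3 a b r ih =>
    intro i h
    match i with
    | 0 =>
      simp only [decs, List.getElem_cons_zero]
      have h1 := decs_headD b r
      have h2 := runD_nonneg b r
      split <;> omega
    | j+1 =>
      simp only [decs, List.getElem_cons_succ]
      exact ih j (by simp only [decs, List.length_cons] at h ⊢; omega)
lemma incsGo_getElem_succ (l : List Int) : ∀ (prev v : Int) (k : Nat) (h : k + 1 < l.length)
    (h1 : k + 1 < (incsGo prev v l).length) (h2 : k < (incsGo prev v l).length) (h3 : k < l.length),
    (incsGo prev v l)[k+1]'h1 = if l[k]'h3 < l[k+1]'h then (incsGo prev v l)[k]'h2 + 1 else 1 := by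
  induction l with
  | nil => intro prev v k h h1 h2 h3; simp at h
  | cons x r ih =>
    intro prev v k h h1 h2 h3
    match r, k with
    | y :: r', 0 => simp [incsGo]
    | y :: r', j+1 =>
      simp only [incsGo, List.getElem_cons_succ]
      exact ih x _ j (by simp only [List.length_cons] at h ⊢; omega)
        (by rw [incsGo_length] at h1 ⊢; simp only [List.length_cons] at h1 ⊢; omega)
        (by rw [incsGo_length] at h1 ⊢; simp only [List.length_cons] at h1 ⊢; omega)
        (by simp only [List.length_cons] at h ⊢; omega)
lemma incs_getElem_succ (A : List Int) (k : Nat) (h : k + 1 < A.length)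
    (h1 : k + 1 < (incs A).length) (h2 : k < (incs A).length) (h3 : k < A.length) :
    (incs A)[k+1]'h1 = if A[k]'h3 < A[k+1]'h then (incs A)[k]'h2 + 1 else 1 := by
  match A, k with
  | a :: r, 0 =>
    match r with
    | y :: r' => simp [incs, incsGo]
  | a :: r, j+1 =>
    simp only [incs, List.getElem_cons_succ]
    exact incsGo_getElem_succ r a 1 j (by simp only [List.length_cons] at h ⊢; omega)
      (by rw [incsGo_length]; simp only [List.length_cons] at h ⊢; omega)
      (by rw [incsGo_length]; simp only [List.length_cons] at h ⊢; omega)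
      (by simp only [List.length_cons] at h ⊢; omega)
lemma decs_getElem_succ (A : List Int) : ∀ (k : Nat) (h : k + 1 < A.length)
    (h1 : k + 1 < (decs A).length) (h2 : k < (decs A).length) (h3 : k < A.length),
    (decs A)[k]'h2 = if A[k+1]'h < A[k]'h3 then (decs A)[k+1]'h1 + 1 else 1 := by
  induction A using decs.induct with
  | case1 => intro k h h1 h2 h3; simp at h
  | case2 a => intro k h h1 h2 h3; simp at h
  | case3 a b r ih =>
    intro k h h1 h2 h3
    match k with
    | 0 =>
      have hlen : 0 < (decs (b :: r)).length := by simp [decs_length]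
      simp only [decs, List.getElem_cons_zero, List.getElem_cons_succ]
      rw [decs_headD_getElem b r hlen]
    | j+1 =>
      simp only [decs, List.getElem_cons_succ]
      exact ih j (by simp only [List.length_cons] at h ⊢; omega)
        (by rw [decs_length]; simp only [List.length_cons] at h ⊢; omega)
        (by rw [decs_length]; simp only [List.length_cons] at h ⊢; omega)
        (by simp only [List.length_cons] at h ⊢; omega)
lemma decs_getElem_last (A : List Int) (h : A ≠ []) (h1 : A.length - 1 < (decs A).length) :
    (decs A)[A.length - 1]'h1 = 1 := by
  induction A using decs.induct with
  | case1 => simp at h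
  | case2 a => simp [decs]
  | case3 a b r ih =>
    have : (a :: b :: r).length - 1 = ((b :: r).length - 1) + 1 := by simp
    simp only [decs, this, List.getElem_cons_succ]
    exact ih (by simp) (by simp [decs_length])

lemma incsGo_append (r : List Int) : ∀ (prev v x : Int),
    incsGo prev v (r ++ [x])
      = incsGo prev v r ++ [if r.getLastD prev < x then (incsGo prev v r).getLastD v + 1 else 1] := by
  induction r with
  | nil => intro prev v x; simp [incsGo]
  | cons y r' ih =>
    intro prev v x
    simp only [List.cons_append, incsGo, List.getLastD_cons]
    rw [ih y]

lemma incs_append (L : List Int) (hL : L ≠ []) (x : Int) :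
    incs (L ++ [x])
      = incs L ++ [if L.getLastD 0 < x then (incs L).getLastD 0 + 1 else 1] := by
  match L with
  | a :: r =>
    simp only [List.cons_append, incs, incsGo_append, List.getLastD_cons]

-- reversal: incs of the reverse is the reverse of decs
lemma incs_reverse (L : List Int) : incs L.reverse = (decs L).reverse := by
  induction L with
  | nil => simp [incs, decs]
  | cons a r ih =>
    match r with
    | [] => simp [incs, decs, incsGo]
    | b :: r' =>
      have hrev : (b :: r').reverse ≠ [] := by simp
      rw [List.reverse_cons, incs_append _ hrev, ih]
      have h1 : ((b :: r').reverse).getLastD 0 = b := by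
        rw [List.getLastD_eq_getLast?, List.getLast?_reverse]; rfl
      have h2 : ((decs (b :: r')).reverse).getLastD 0 = (decs (b :: r')).headD 0 := by
        rw [List.getLastD_eq_getLast?, List.getLast?_reverse, List.headD_eq_head?]
      rw [h1, h2]
      simp only [decs, List.reverse_cons]

lemma decs_reverse (L : List Int) : decs L.reverse = (incs L).reverse := by
  have := incs_reverse L.reverse
  rw [List.reverse_reverse] at this
  rw [this, List.reverse_reverse]

lemma mrev_reverse (A : List Int) : mrev A.reverse = refC A := by
  unfold mrev refC
  rw [incs_reverse, decs_reverse,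
    ← List.reverse_zipWith (by rw [incs_length, decs_length]), List.sum_reverse]

lemma zsum_cons (a b : Int) (d i : List Int) :
    (List.zipWith max (a :: d) (b :: i)).sum = max a b + (List.zipWith max d i).sum := by simp

lemma incsGo_cons (prev v x : Int) (r : List Int) :
    incsGo prev v (x :: r) = (if prev < x then v + 1 else 1) :: incsGo x (if prev < x then v + 1 else 1) r := rfl

lemma decs_cons2 (a b : Int) (r : List Int) :
    decs (a :: b :: r) = (if b < a then ((decs (b :: r)).headD 0) + 1 else 1) :: decs (b :: r) := rfl

lemma runA_cons (prev x : Int) (r : List Int) :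
    runA prev (x :: r) = if prev < x then 1 + runA x r else 0 := rfl

lemma aPeak_cons (prev x : Int) (r : List Int) :
    aPeak prev (x :: r) = if prev < x then (if runA x r = 0 then (decs (x :: r)).headD 0 else aPeak x r) else 0 := rfl

-- the bump lemma: raising the carried value by one raises the max-sum by the slope delta
lemma bump (t : List Int) : ∀ (prev v : Int), 1 ≤ v →
    (List.zipWith max (decs t) (incsGo prev (v+1) t)).sum
      = (List.zipWith max (decs t) (incsGo prev v t)).sum
        + (if runA prev t = 0 then 0
           else runA prev t - 1 + (if aPeak prev t ≤ v + runA prev t then 1 else 0)) := by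
  induction t with
  | nil => intro prev v hv; simp [runA, decs]
  | cons x r ih =>
    intro prev v hv
    by_cases hpx : prev < x
    · match r with
      | [] =>
        simp only [decs, incsGo, runA, aPeak, if_pos hpx, List.zipWith, List.sum_cons,
          List.sum_nil, List.headD_cons]
        split_ifs <;> omega
      | y :: r' =>
        have e1 : incsGo prev (v+1) (x :: y :: r') = (v+1+1) :: incsGo x (v+1+1) (y :: r') := by
          rw [incsGo_cons, if_pos hpx]
        have e2 : incsGo prev v (x :: y :: r') = (v+1) :: incsGo x (v+1) (y :: r') := by
          rw [incsGo_cons, if_pos hpx]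
        have hrunA : runA prev (x :: y :: r') = 1 + runA x (y :: r') := by
          rw [runA_cons, if_pos hpx]
        rw [e1, e2, decs_cons2, zsum_cons, zsum_cons, hrunA]
        by_cases hxy : x < y
        · have hra : 1 ≤ runA x (y :: r') := by
            rw [runA_cons, if_pos hxy]
            have := runA_nonneg y r'; omega
          have hIH := ih x (v+1) (by omega)
          rw [hIH]
          have haP : aPeak prev (x :: y :: r') = aPeak x (y :: r') := by
            rw [aPeak_cons, if_pos hpx, if_neg (by omega)]
          rw [haP, if_neg (lt_asymm hxy), if_neg (by omega : ¬ (1 + runA x (y :: r') = 0)),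
            if_neg (by omega : ¬ (runA x (y :: r') = 0))]
          split_ifs <;> omega
        · have h0 : runA x (y :: r') = 0 := by rw [runA_cons, if_neg hxy]
          have e4 : incsGo x (v+1+1) (y :: r') = 1 :: incsGo y 1 r' := by
            rw [incsGo_cons, if_neg hxy]
          have e5 : incsGo x (v+1) (y :: r') = 1 :: incsGo y 1 r' := by
            rw [incsGo_cons, if_neg hxy]
          have haP : aPeak prev (x :: y :: r') = (if y < x then ((decs (y :: r')).headD 0) + 1 else 1) := by
            rw [aPeak_cons, if_pos hpx, if_pos h0, decs_cons2, List.headD_cons]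
          rw [e4, e5, h0, haP, if_neg (by omega : ¬ ((1:Int) + 0 = 0))]
          split_ifs <;> omega
    · have h0 : runA prev (x :: r) = 0 := by simp [runA, hpx]
      simp only [incsGo, if_neg hpx, h0]
      simp

lemma incs_cons (a : Int) (r : List Int) : incs (a :: r) = 1 :: incsGo a 1 r := rfl

lemma decs_sing (a : Int) : decs [a] = [1] := rfl

lemma runD_cons (prev x : Int) (r : List Int) :
    runD prev (x :: r) = if x < prev then 1 + runD x r else 0 := rfl

-- the cons delta for mrev: what one new element adds
lemma mrev_cons (x : Int) (q : List Int) (hq : q ≠ []) :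
    mrev (x :: q)
      = mrev q + (if q.headD 0 < x then upF q + 2
                  else if x = q.headD 0 then 1
                  else downF q + 2 - (if peakF q ≥ downF q + 1 then 1 else 0)) := by
  match q with
  | q0 :: t =>
    simp only [List.headD_cons, upF, downF, peakF, mrev]
    rcases lt_trichotomy q0 x with hlt | heq | hgt
    · rw [if_pos hlt]
      have e3 : decs (x :: q0 :: t) = ((decs (q0 :: t)).headD 0 + 1) :: decs (q0 :: t) := by
        rw [decs_cons2, if_pos hlt]
      have e1 : incs (x :: q0 :: t) = 1 :: incs (q0 :: t) := by
        rw [incs_cons, incs_cons, incsGo_cons, if_neg (lt_asymm hlt)]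
      rw [e3, e1, zsum_cons, decs_headD]
      have := runD_nonneg q0 t
      omega
    · subst heq
      rw [if_neg (lt_irrefl q0), if_pos rfl]
      have e3 : decs (q0 :: q0 :: t) = 1 :: decs (q0 :: t) := by
        rw [decs_cons2, if_neg (lt_irrefl q0)]
      have e1 : incs (q0 :: q0 :: t) = 1 :: incs (q0 :: t) := by
        rw [incs_cons, incs_cons, incsGo_cons, if_neg (lt_irrefl q0)]
      rw [e3, e1, zsum_cons]
      omega
    · rw [if_neg (lt_asymm hgt), if_neg (by omega : ¬ x = q0)]
      have e3 : decs (x :: q0 :: t) = 1 :: decs (q0 :: t) := by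
        rw [decs_cons2, if_neg (lt_asymm hgt)]
      have e1 : incs (x :: q0 :: t) = 1 :: (1+1) :: incsGo q0 (1+1) t := by
        rw [incs_cons, incsGo_cons, if_pos hgt]
      rw [e3, e1]
      match t with
      | [] =>
        simp only [decs_sing, incs, incsGo, runA, runD, List.zipWith, List.sum_cons, List.sum_nil]
        split_ifs <;> omega
      | y :: t' =>
        rw [incs_cons, decs_cons2, zsum_cons, zsum_cons, zsum_cons,
          bump (y :: t') q0 1 le_rfl]
        have hd : (if y < q0 then (decs (y :: t')).headD 0 + 1 else 1) = runD q0 (y :: t') + 1 := by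
          have h := decs_headD q0 (y :: t')
          rwa [decs_cons2, List.headD_cons] at h
        by_cases h0 : runA q0 (y :: t') = 0
        · simp only [h0, hd]
          have := runD_nonneg q0 (y :: t')
          split_ifs <;> omega
        · have hq0y : q0 < y := by
            by_contra hc
            exact h0 (by rw [runA_cons, if_neg hc])
          have hd0 : runD q0 (y :: t') = 0 := by
            rw [runD_cons, if_neg (lt_asymm hq0y)]
          simp only [if_neg h0, hd, hd0]
          have := runA_nonneg q0 (y :: t')
          split_ifs <;> omega

lemma altGo_eq (rest : List Int) : ∀ (q : List Int), q ≠ [] →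
    altGo (q.headD 0) (upF q) (downF q) (peakF q) (mrev q) rest = mrev (rest.reverse ++ q) := by
  induction rest with
  | nil => intro q hq; simp [altGo]
  | cons cur r ih =>
    intro q hq
    match q with
    | q0 :: t =>
      simp only [List.headD_cons, altGo]
      have hq' : (cur :: q0 :: t) ≠ [] := by simp
      have h2 := ih (cur :: q0 :: t) hq'
      simp only [List.headD_cons] at h2
      rcases lt_trichotomy q0 cur with hlt | heq | hgt
      · rw [if_pos hlt]
        have hup : upF (cur :: q0 :: t) = upF (q0 :: t) + 1 := by
          simp only [upF, runD_cons, if_pos hlt]; omega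
        have hdn : downF (cur :: q0 :: t) = 0 := by
          simp only [downF, runA_cons, if_neg (lt_asymm hlt)]
        have hpk : peakF (cur :: q0 :: t) = upF (q0 :: t) + 1 := by
          simp only [peakF, runA_cons, if_neg (lt_asymm hlt), if_true]
          simp only [runD_cons, if_pos hlt, upF]; omega
        have hmr : mrev (cur :: q0 :: t) = mrev (q0 :: t) + (1 + (upF (q0 :: t) + 1)) := by
          rw [mrev_cons cur (q0 :: t) (by simp)]
          simp only [List.headD_cons]
          rw [if_pos hlt]; omega
        simp only [hup, hdn, hpk, hmr] at h2
        rw [h2, List.reverse_cons, List.append_assoc, List.singleton_append]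
      · rw [if_neg (by omega : ¬ cur > q0), if_pos heq.symm]
        have hup : upF (cur :: q0 :: t) = 0 := by
          simp only [upF, runD_cons, if_neg (by omega : ¬ q0 < cur)]
        have hdn : downF (cur :: q0 :: t) = 0 := by
          simp only [downF, runA_cons, if_neg (by omega : ¬ cur < q0)]
        have hpk : peakF (cur :: q0 :: t) = 0 := by
          simp only [peakF, runA_cons, if_neg (by omega : ¬ cur < q0), if_true]
          simp only [runD_cons, if_neg (by omega : ¬ q0 < cur)]
        have hmr : mrev (cur :: q0 :: t) = mrev (q0 :: t) + 1 := by
          rw [mrev_cons cur (q0 :: t) (by simp)]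
          simp only [List.headD_cons]
          rw [if_neg (by omega : ¬ q0 < cur), if_pos heq.symm]
        simp only [hup, hdn, hpk, hmr] at h2
        rw [h2, List.reverse_cons, List.append_assoc, List.singleton_append]
      · rw [if_neg (by omega : ¬ cur > q0), if_neg (by omega : ¬ cur = q0)]
        have hup : upF (cur :: q0 :: t) = 0 := by
          simp only [upF, runD_cons, if_neg (by omega : ¬ q0 < cur)]
        have hdn : downF (cur :: q0 :: t) = downF (q0 :: t) + 1 := by
          simp only [downF, runA_cons, if_pos hgt]; omega
        have hra : ¬ runA cur (q0 :: t) = 0 := by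
          rw [runA_cons, if_pos hgt]; have := runA_nonneg q0 t; omega
        have hpk : peakF (cur :: q0 :: t) = peakF (q0 :: t) := by
          simp only [peakF, if_neg hra, aPeak_cons, if_pos hgt]
          by_cases hA : runA q0 t = 0
          · rw [if_pos hA, if_pos hA, decs_headD]; omega
          · rw [if_neg hA, if_neg hA]
        have hmr : mrev (cur :: q0 :: t)
            = mrev (q0 :: t) + (downF (q0 :: t) + 2 - (if peakF (q0 :: t) ≥ downF (q0 :: t) + 1 then 1 else 0)) := by
          rw [mrev_cons cur (q0 :: t) (by simp)]
          simp only [List.headD_cons]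
          rw [if_neg (by omega : ¬ q0 < cur), if_neg (by omega : ¬ cur = q0)]
        have htot : (if peakF (q0 :: t) ≥ downF (q0 :: t) + 1
              then (mrev (q0 :: t) + (1 + (downF (q0 :: t) + 1))) - 1
              else mrev (q0 :: t) + (1 + (downF (q0 :: t) + 1)))
            = mrev (q0 :: t) + (downF (q0 :: t) + 2 - (if peakF (q0 :: t) ≥ downF (q0 :: t) + 1 then 1 else 0)) := by
          split_ifs <;> omega
        rw [htot]
        simp only [hup, hdn, hpk, hmr] at h2
        rw [h2, List.reverse_cons, List.append_assoc, List.singleton_append]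

lemma alt_eq_refC (A : List Int) : distributeCandy_alt A = refC A := by
  match A with
  | [] => rfl
  | a :: rest =>
    have h := altGo_eq rest [a] (by simp)
    have h1 : upF [a] = 0 := rfl
    have h2 : downF [a] = 0 := rfl
    have h3 : peakF [a] = 0 := by simp [peakF, runA, runD]
    have h4 : mrev [a] = 1 := by simp [mrev, decs, incs, incsGo]
    simp only [List.headD_cons, h1, h2, h3, h4] at h
    show altGo a 0 0 0 1 rest = refC (a :: rest)
    rw [h]
    have hr : rest.reverse ++ [a] = (a :: rest).reverse := by simp
    rw [hr, mrev_reverse]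

-- ===== pass 1 =====
def step1 (A : List Int) (c : List Int) (i : Int) : List Int :=
  if PySem.List.pyGetD A i 0 > PySem.List.pyGetD A (i-1) 0 then
    PySem.List.pySetD c i (PySem.List.pyGetD c (i-1) 0 + 1)
  else c

def state1 (A : List Int) (k : Nat) : List Int :=
  incs (A.take k) ++ List.replicate (A.length - k) 1

lemma take_getLastD (A : List Int) (k : Nat) (hk1 : 1 ≤ k) (hk : k ≤ A.length) :
    (A.take k).getLastD 0 = A[k-1]'(by omega) := by
  rw [List.getLastD_eq_getLast?, List.getLast?_eq_getElem?]
  rw [show (A.take k).length - 1 = k - 1 from by rw [List.length_take]; omega]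
  rw [List.getElem?_take, if_pos (by omega), List.getElem?_eq_getElem (by omega)]
  rfl

lemma getLastD_len (l : List Int) (k : Nat) (hl : l.length = k) (hk : 1 ≤ k) :
    l.getLastD 0 = l[k-1]'(by omega) := by
  have h2 : l[l.length - 1]? = some (l[k-1]'(by omega)) := by
    rw [show l.length - 1 = k - 1 from by omega]
    exact List.getElem?_eq_getElem (by omega)
  rw [List.getLastD_eq_getLast?, List.getLast?_eq_getElem?, h2]
  rfl

lemma step1_state (A : List Int) (k : Nat) (hk1 : 1 ≤ k) (hk : k < A.length) :
    step1 A (state1 A k) (k : Int) = state1 A (k+1) := by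
  unfold step1 state1
  have hTlen : (A.take k).length = k := by rw [List.length_take]; omega
  have hIlen : (incs (A.take k)).length = k := by rw [incs_length, hTlen]
  have hAk : PySem.List.pyGetD A (k : Int) 0 = A[k] := by
    rw [PySem.List.pyGetD_natCast, List.getD_eq_getElem A 0 hk]
  have hcast : (k : Int) - 1 = ((k - 1 : Nat) : Int) := by omega
  have hAk1 : PySem.List.pyGetD A ((k:Int) - 1) 0 = A[k-1]'(by omega) := by
    rw [hcast, PySem.List.pyGetD_natCast, List.getD_eq_getElem A 0 (by omega)]
  have hlast : (A.take k).getLastD 0 = A[k-1]'(by omega) := take_getLastD A k hk1 (by omega)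
  have hlastI : (incs (A.take k)).getLastD 0 = (incs (A.take k))[k-1]'(by omega) :=
    getLastD_len _ k hIlen hk1
  have hread : PySem.List.pyGetD (incs (A.take k) ++ List.replicate (A.length - k) 1) ((k:Int) - 1) 0
      = (incs (A.take k))[k-1]'(by omega) := by
    rw [hcast, PySem.List.pyGetD_natCast,
      List.getD_eq_getElem _ 0 (by rw [List.length_append, hIlen, List.length_replicate]; omega)]
    exact List.getElem_append_left (by omega)
  have htake : incs (A.take (k+1))
      = incs (A.take k) ++ [if A[k-1]'(by omega) < A[k] then (incs (A.take k))[k-1]'(by omega) + 1 else 1] := by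
    rw [List.take_add_one, List.getElem?_eq_getElem hk, Option.toList_some]
    rw [incs_append (A.take k) (by rw [← List.length_pos_iff, hTlen]; omega) (A[k]), hlast, hlastI]
  have hrep : List.replicate (A.length - k) (1:Int) = 1 :: List.replicate (A.length - (k+1)) 1 := by
    rw [show A.length - k = (A.length - (k+1)) + 1 from by omega, List.replicate_succ]
  rw [hAk, hAk1, hread, htake]
  by_cases hc : A[k-1]'(by omega) < A[k]
  · rw [if_pos hc, if_pos hc, PySem.List.pySetD_natCast, List.set_append,
      if_neg (by rw [hIlen]; omega), hrep]
    rw [show k - (incs (A.take k)).length = 0 from by rw [hIlen]; omega, List.set_cons_zero]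
    rw [List.append_assoc, List.singleton_append]
  · rw [if_neg hc, if_neg hc, hrep, List.append_assoc, List.singleton_append]

lemma pass1_loop (A : List Int) : ∀ (d : Nat) (j : Int), 1 ≤ j → j ≤ (A.length : Int) →
    ((A.length : Int) - j).toNat = d →
    (PySem.List.pyRange j (A.length : Int) 1).foldl (step1 A) (state1 A j.toNat) = incs A := by
  intro d
  induction d generalizing A with
  | zero =>
    intro j h1 h2 h3
    have hj : j = (A.length : Int) := by omega
    subst hj
    rw [PySem.List.pyRange_one_eq_nil le_rfl]
    simp only [List.foldl_nil, state1, Int.toNat_natCast]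
    rw [List.take_of_length_le le_rfl, Nat.sub_self]
    simp
  | succ d ihd =>
    intro j h1 h2 h3
    have hjlt : j < (A.length : Int) := by omega
    rw [PySem.List.pyRange_one_cons hjlt, List.foldl_cons]
    have hk : j = ((j.toNat : Nat) : Int) := by omega
    have hsx := step1_state A j.toNat (by omega) (by omega)
    rw [← hk] at hsx
    rw [hsx]
    have hres := ihd A (j+1) (by omega) (by omega) (by omega)
    rw [show (j+1).toNat = j.toNat + 1 from by omega] at hres
    exact hres

-- ===== pass 2 =====
def step2 (A : List Int) (c : List Int) (i : Int) : List Int :=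
  if PySem.List.pyGetD A i 0 > PySem.List.pyGetD A (i+1) 0 then
    PySem.List.pySetD c i (max (PySem.List.pyGetD c i 0) (PySem.List.pyGetD c (i+1) 0 + 1))
  else c

def mList (A : List Int) : List Int := List.zipWith max (incs A) (decs A)

def state2 (A : List Int) (k : Nat) : List Int :=
  (incs A).take k ++ (mList A).drop k

lemma mList_length (A : List Int) : (mList A).length = A.length := by
  rw [mList, List.length_zipWith, incs_length, decs_length, min_self]

lemma mList_getElem (A : List Int) (i : Nat) (h : i < A.length) :
    (mList A)[i]'(by rw [mList_length]; omega)
      = max ((incs A)[i]'(by rw [incs_length]; omega)) ((decs A)[i]'(by rw [decs_length]; omega)) := by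
  exact List.getElem_zipWith

lemma step2_state (A : List Int) (k : Nat) (hk : k + 1 < A.length) :
    step2 A (state2 A (k+1)) (k : Int) = state2 A k := by
  unfold step2 state2
  have hIlen : (incs A).length = A.length := incs_length A
  have hDlen : (decs A).length = A.length := decs_length A
  have hMlen : (mList A).length = A.length := mList_length A
  have hTlen : ((incs A).take (k+1)).length = k + 1 := by rw [List.length_take]; omega
  have hAk : PySem.List.pyGetD A (k : Int) 0 = A[k]'(by omega) := by
    rw [PySem.List.pyGetD_natCast, List.getD_eq_getElem A 0 (by omega)]
  have hcast : (k : Int) + 1 = ((k + 1 : Nat) : Int) := by omega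
  have hAk1 : PySem.List.pyGetD A ((k:Int) + 1) 0 = A[k+1] := by
    rw [hcast, PySem.List.pyGetD_natCast, List.getD_eq_getElem A 0 hk]
  have hslen : ((incs A).take (k+1) ++ (mList A).drop (k+1)).length = A.length := by
    rw [List.length_append, hTlen, List.length_drop, hMlen]; omega
  have hrd1 : PySem.List.pyGetD ((incs A).take (k+1) ++ (mList A).drop (k+1)) (k:Int) 0
      = (incs A)[k]'(by omega) := by
    rw [PySem.List.pyGetD_natCast, List.getD_eq_getElem _ 0 (by rw [hslen]; omega)]
    rw [List.getElem_append_left (by rw [hTlen]; omega)]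
    exact List.getElem_take
  have hrd2 : PySem.List.pyGetD ((incs A).take (k+1) ++ (mList A).drop (k+1)) ((k:Int)+1) 0
      = (mList A)[k+1]'(by omega) := by
    rw [hcast, PySem.List.pyGetD_natCast, List.getD_eq_getElem _ 0 (by rw [hslen]; omega)]
    rw [List.getElem_append_right (by rw [hTlen])]
    rw [List.getElem_drop]
    congr 1
    rw [hTlen]
    omega
  rw [hAk, hAk1, hrd1, hrd2]
  by_cases hc : A[k+1] < A[k]'(by omega)
  · rw [if_pos hc, PySem.List.pySetD_natCast, List.set_append, if_pos (by rw [hTlen]; omega)]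
    rw [List.take_add_one, List.getElem?_eq_getElem (by omega : k < (incs A).length), Option.toList_some]
    rw [List.set_append, if_neg (by rw [List.length_take]; omega)]
    rw [show k - ((incs A).take k).length = 0 from by rw [List.length_take]; omega]
    rw [List.set_cons_zero]
    rw [List.drop_eq_getElem_cons (by omega : k < (mList A).length)]
    rw [List.append_assoc, List.singleton_append]
    congr 2
    have h1 : (decs A)[k]'(by omega) = (decs A)[k+1]'(by omega) + 1 := by
      rw [decs_getElem_succ A k hk (by omega) (by omega) (by omega), if_pos hc]
    have h2 : (incs A)[k+1]'(by omega) = 1 := by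
      rw [incs_getElem_succ A k hk (by omega) (by omega) (by omega), if_neg (by omega)]
    have h3 := decs_pos A (k+1) (by omega)
    rw [mList_getElem A k (by omega), mList_getElem A (k+1) (by omega), h1, h2]
    omega
  · rw [if_neg hc]
    rw [List.take_add_one, List.getElem?_eq_getElem (by omega : k < (incs A).length), Option.toList_some,
      List.drop_eq_getElem_cons (by omega : k < (mList A).length), List.append_assoc, List.singleton_append]
    congr 2
    have h4 : (decs A)[k]'(by omega) = 1 := by
      rw [decs_getElem_succ A k hk (by omega) (by omega) (by omega), if_neg hc]
    have h5 := incs_pos A k (by omega)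
    rw [mList_getElem A k (by omega), h4]
    omega

lemma pass2_loop (A : List Int) : ∀ (d : Nat) (j : Int), -1 ≤ j → j ≤ (A.length : Int) - 2 →
    (j + 1).toNat = d →
    (PySem.List.pyRange j (-1) (-1)).foldl (step2 A) (state2 A (j+1).toNat) = mList A := by
  intro d
  induction d generalizing A with
  | zero =>
    intro j h1 h2 h3
    have hj : j = -1 := by omega
    subst hj
    rw [PySem.List.pyRange_neg_one_eq_nil (by omega)]
    simp [state2]
  | succ d ihd =>
    intro j h1 h2 h3
    have h0 : 0 ≤ j := by omega
    rw [PySem.List.pyRange_neg_one_cons (by omega), List.foldl_cons]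
    have hk : j = ((j.toNat : Nat) : Int) := by omega
    have hsx := step2_state A j.toNat (by omega)
    rw [← hk] at hsx
    rw [show (j+1).toNat = j.toNat + 1 from by omega, hsx]
    have hres := ihd A (j - 1) (by omega) (by omega) (by omega)
    rw [show (j - 1 + 1).toNat = j.toNat from by omega] at hres
    exact hres

lemma incs_eq_state2 (A : List Int) (hA : A ≠ []) :
    incs A = state2 A (((A.length : Int) - 2 + 1).toNat) := by
  have hn : 1 ≤ A.length := by cases A; simp at hA; simp
  have hMlen := mList_length A
  have ht : (((A.length : Int)) - 2 + 1).toNat = A.length - 1 := by omega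
  rw [ht]
  unfold state2
  have hdrop : (mList A).drop (A.length - 1) = [(mList A)[A.length - 1]'(by omega)] := by
    rw [List.drop_eq_getElem_cons (by omega)]
    rw [show A.length - 1 + 1 = (mList A).length from by omega, List.drop_length]
  rw [hdrop]
  have hM : (mList A)[A.length - 1]'(by omega) = (incs A)[A.length - 1]'(by rw [incs_length]; omega) := by
    rw [mList_getElem A (A.length - 1) (by omega), decs_getElem_last A hA (by rw [decs_length]; omega)]
    have := incs_pos A (A.length - 1) (by rw [incs_length]; omega)
    omega
  rw [hM]
  rw [show (incs A).take (A.length - 1) ++ [(incs A)[A.length - 1]'(by rw [incs_length]; omega)]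
      = (incs A).take ((A.length - 1) + 1) from by
    rw [List.take_add_one, List.getElem?_eq_getElem (by rw [incs_length]; omega), Option.toList_some]]
  rw [List.take_of_length_le (by rw [incs_length]; omega)]

lemma a_eq_refC (A : List Int) : distributeCandy A = refC A := by
  match A with
  | [] => rfl
  | a :: rest =>
    show ((PySem.List.pyRange (((a :: rest).length : Int) - 2) (-1) (-1)).foldl (step2 (a :: rest))
        ((PySem.List.pyRange 1 ((a :: rest).length : Int) 1).foldl (step1 (a :: rest))
          (List.replicate (a :: rest).length 1))).sum = refC (a :: rest)
    have hc0 : List.replicate (a :: rest).length (1:Int) = state1 (a :: rest) ((1:Int).toNat) := by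
      simp [state1, incs, incsGo, List.replicate_succ]
    rw [hc0, pass1_loop (a :: rest) (((a :: rest).length : Int) - 1).toNat 1 (by norm_num)
      (by simp) rfl]
    rw [incs_eq_state2 (a :: rest) (by simp)]
    rw [pass2_loop (a :: rest) ((((a :: rest).length : Int) - 2) + 1).toNat
      (((a :: rest).length : Int) - 2) (by simp; omega) le_rfl rfl]
    rfl

-- ===== VERDICT (by name: the statement is the Claim_ definition above) =====
theorem distributeCandy_spec : Claim_equal_distributeCandy := by
  intro A _
  unfold Spec_distributeCandy
  rw [a_eq_refC, alt_eq_refC]
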